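-- pv_equiv track=rewrite | github.com/MoinKhan2000/DSA-Using-Python-From-Coding-Ninjas | 10 Week/2  Module Hashing/102_Longest_Consecutive_Sequence.py | longestSequeceThatSumToKUsingHashWorkFor0
-- ===== SOURCE A (Python) =====
-- def longestSequeceThatSumToKUsingHashWorkFor0(arr, n):
--     maxLen = 0
--     hashSet = {}
--     curLength = 0
--     totalSum = 0
--     for i in range(len(arr)):
--         totalSum += arr[i]
--         if totalSum == n:
--             maxLen = max(maxLen, i + 1)
--         remain = totalSum - n
--         if remain in hashSet:
--             curLength = i - hashSet[remain]
--             maxLen = max(curLength, maxLen)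
--         if totalSum not in hashSet:
--             hashSet[totalSum] = i
--     return maxLen
-- ===== SOURCE B (Python) =====
-- def _minIndexWith(pref, order, v):
--     # smallest index k with pref[k] == v, by binary search over the sorted order
--     lo, hi = 0, len(order)
--     while lo < hi:
--         mid = (lo + hi) // 2
--         if pref[order[mid]] < v:
--             lo = mid + 1
--         else:
--             hi = mid
--     if lo < len(order) and pref[order[lo]] == v:
--         return order[lo]
--     return None
--
--
-- def longestSequeceThatSumToKUsingHashWorkFor0(arr, n):
--     # stage 1: prefix sums pref[0..len(arr)]
--     pref = [0]
--     s = 0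
--     for x in arr:
--         s += x
--         pref.append(s)
--     m = len(pref)
--     # stage 2: prefix indices sorted by (pref[k], k); the integer key is injective
--     # and orders exactly like that lexicographic pair since 0 <= k < m
--     order = sorted(range(m), key=lambda k: pref[k] * m + k)
--     # stage 3: for each end j, binary-search the earliest prefix equal to pref[j] - n
--     best = 0
--     for j in range(1, m):
--         i = _minIndexWith(pref, order, pref[j] - n)
--         if i is not None and i < j:
--             best = max(best, j - i)
--     return best
-- ===== Notes on version B (the rewrite author's own statement) =====
-- stated objective: alternative
-- what changed: Replaces A's online prefix-sum hashmap pass with a sort-and-binary-search pipeline: materialize the prefix-sum array, sort the prefix indices by (value, index) with an injective integer key, then for each end position binary-search that sorted order for the earliest prefix equal to pref[j]-n (no dictionary at all).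
import Mathlib
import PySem

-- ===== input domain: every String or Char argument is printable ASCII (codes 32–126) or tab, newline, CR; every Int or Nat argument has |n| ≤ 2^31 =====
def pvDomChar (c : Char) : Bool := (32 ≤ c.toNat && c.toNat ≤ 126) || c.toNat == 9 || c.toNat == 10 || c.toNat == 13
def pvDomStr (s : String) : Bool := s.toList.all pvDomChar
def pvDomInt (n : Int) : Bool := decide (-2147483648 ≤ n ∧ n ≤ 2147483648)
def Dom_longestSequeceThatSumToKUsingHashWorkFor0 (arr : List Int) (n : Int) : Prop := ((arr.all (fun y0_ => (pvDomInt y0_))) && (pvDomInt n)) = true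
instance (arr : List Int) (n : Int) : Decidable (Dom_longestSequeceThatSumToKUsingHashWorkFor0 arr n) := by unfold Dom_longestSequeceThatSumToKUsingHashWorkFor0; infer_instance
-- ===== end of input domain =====

-- B replaces A's online prefix-sum hashmap pass with a staged sort-and-binary-search pipeline (alternative algorithm, no dict); return values proved equal.


-- ===== PORT A =====
-- loop body of A; state = (maxLen, hashSet, curLength, totalSum)
def pvStepA (arr : List Int) (n : Int) (st : Int × PySem.Dict Int Int × Int × Int) (i : Int) :
    Int × PySem.Dict Int Int × Int × Int :=
  let maxLen := st.1
  let hashSet := st.2.1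
  let curLength := st.2.2.1
  let totalSum := st.2.2.2 + PySem.List.pyGetD arr i 0
  let maxLen := if totalSum = n then max maxLen (i + 1) else maxLen
  let remain := totalSum - n
  let (curLength, maxLen) :=
    if hashSet.contains remain then
      let curLength := i - hashSet.getD remain 0
      (curLength, max curLength maxLen)
    else (curLength, maxLen)
  let hashSet := if hashSet.contains totalSum then hashSet else hashSet.insert totalSum i
  (maxLen, hashSet, curLength, totalSum)

def longestSequeceThatSumToKUsingHashWorkFor0 (arr : List Int) (n : Int) : Int :=
  ((PySem.List.pyRange 0 arr.length 1).foldl (pvStepA arr n) (0, PySem.Dict.empty, 0, 0)).1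

-- ===== PORT B =====
-- helper _minIndexWith of B: the while-loop, then the final equality test
def pvMinIdxLoop (pref order : List Int) (v : Int) (lo hi : Int) : Int :=
  if h : lo < hi then
    let mid := PySem.Int.floordiv (lo + hi) 2
    if PySem.List.pyGetD pref (PySem.List.pyGetD order mid 0) 0 < v then
      pvMinIdxLoop pref order v (mid + 1) hi
    else
      pvMinIdxLoop pref order v lo mid
  else lo
termination_by (hi - lo).toNat
decreasing_by
  · simp only [PySem.Int.floordiv, Int.fdiv_eq_ediv] at *
    omega
  · simp only [PySem.Int.floordiv, Int.fdiv_eq_ediv] at *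
    omega

def pvMinIndexWith (pref order : List Int) (v : Int) : Option Int :=
  let lo := pvMinIdxLoop pref order v 0 (order.length : Int)
  if lo < (order.length : Int) ∧ PySem.List.pyGetD pref (PySem.List.pyGetD order lo 0) 0 = v then
    some (PySem.List.pyGetD order lo 0)
  else none

def longestSequeceThatSumToKUsingHashWorkFor0_alt (arr : List Int) (n : Int) : Int :=
  -- stage 1: prefix sums pref[0..len(arr)]
  let ps := arr.foldl (fun st x => (st.1 ++ [st.2 + x], st.2 + x)) (([0] : List Int), (0 : Int))
  let pref := ps.1
  let m : Int := (pref.length : Int)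
  -- stage 2: prefix indices sorted by (pref[k], k) through an injective integer key
  let order := PySem.List.sorted (PySem.List.pyRange 0 m 1)
      (fun k => PySem.List.pyGetD pref k 0 * m + k) false
  -- stage 3: for each end j, binary-search the earliest prefix equal to pref[j] - n
  (PySem.List.pyRange 1 m 1).foldl
    (fun best j =>
      match pvMinIndexWith pref order (PySem.List.pyGetD pref j 0 - n) with
      | some i => if i < j then max best (j - i) else best
      | none => best) 0

-- ===== PRECONDITION & SPEC =====
def Spec_longestSequeceThatSumToKUsingHashWorkFor0 (arr : List Int) (n : Int) (out : Int) : Prop := out = longestSequeceThatSumToKUsingHashWorkFor0_alt arr n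
instance (arr : List Int) (n : Int) (out : Int) : Decidable (Spec_longestSequeceThatSumToKUsingHashWorkFor0 arr n out) := by unfold Spec_longestSequeceThatSumToKUsingHashWorkFor0; infer_instance

-- ===== CLAIM (what is proved, stated in full; the proofs are below) =====
def Claim_equal_longestSequeceThatSumToKUsingHashWorkFor0 : Prop := ∀ (arr : List Int) (n : Int), Dom_longestSequeceThatSumToKUsingHashWorkFor0 arr n → Spec_longestSequeceThatSumToKUsingHashWorkFor0 arr n (longestSequeceThatSumToKUsingHashWorkFor0 arr n)

-- ===== LEMMAS AND PROOFS =====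

-- prefix sum of the first t elements
def pvPre (arr : List Int) (t : Nat) : Int := (arr.take t).sum

-- "l is the length of a subarray ending before index t whose sum is n"
def pvGoodE (arr : List Int) (n : Int) (t : Nat) (l : Int) : Prop :=
  ∃ i j : Nat, i ≤ j ∧ j < t ∧ pvPre arr (j + 1) - pvPre arr i = n ∧ l = (j : Int) - (i : Int) + 1

-- hash invariant: the dict maps each prefix-sum value to the FIRST index where it occurred
def pvHashInv (arr : List Int) (t : Nat) (d : PySem.Dict Int Int) : Prop :=
  ∀ s k, d.get? s = some k ↔
    ∃ m : Nat, k = (m : Int) ∧ m < t ∧ pvPre arr (m + 1) = s ∧ ∀ m' < m, pvPre arr (m' + 1) ≠ s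

-- characterization of "maximum goal length, 0 if none"
def pvChar (G : Int → Prop) (r : Int) : Prop := (r = 0 ∨ G r) ∧ ∀ l, G l → l ≤ r

theorem pvChar_unique (G : Int → Prop) (h1 : ∀ l, G l → 1 ≤ l) {r1 r2 : Int}
    (c1 : pvChar G r1) (c2 : pvChar G r2) : r1 = r2 := by
  obtain ⟨e1, u1⟩ := c1
  obtain ⟨e2, u2⟩ := c2
  rcases e1 with h | h <;> rcases e2 with h' | h'
  · omega
  · have := u1 _ h'; have := h1 _ h'; omega
  · have := u2 _ h; have := h1 _ h; omega
  · have := u1 _ h'; have := u2 _ h; omega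

theorem pvPre_succ (arr : List Int) (t : Nat) (h : t < arr.length) :
    pvPre arr (t + 1) = pvPre arr t + arr[t] := by
  unfold pvPre
  exact List.sum_take_succ arr t h

theorem pvGoodE_one (arr : List Int) (n : Int) (l : Int) :
    pvGoodE arr n arr.length l → 1 ≤ l := by
  rintro ⟨i, j, hij, _, _, rfl⟩; omega

-- ---------- A side ----------

def pvStateA (arr : List Int) (n : Int) (t : Nat) : Int × PySem.Dict Int Int × Int × Int :=
  (PySem.List.pyRange 0 (t : Int) 1).foldl (pvStepA arr n) (0, PySem.Dict.empty, 0, 0)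

theorem pvStateA_succ (arr : List Int) (n : Int) (t : Nat) :
    pvStateA arr n (t + 1) = pvStepA arr n (pvStateA arr n t) (t : Int) := by
  unfold pvStateA
  simp only [Nat.cast_add, Nat.cast_one]
  rw [PySem.List.pyRange_one_succ_right (by exact_mod_cast Nat.zero_le t), List.foldl_append]
  rfl

def pvInvA (arr : List Int) (n : Int) (t : Nat) (st : Int × PySem.Dict Int Int × Int × Int) : Prop :=
  st.2.2.2 = pvPre arr t ∧ pvHashInv arr t st.2.1 ∧ pvChar (pvGoodE arr n t) st.1

theorem pvInvA_zero (arr : List Int) (n : Int) : pvInvA arr n 0 (0, PySem.Dict.empty, 0, 0) := by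
  refine ⟨rfl, ?_, Or.inl rfl, ?_⟩
  · intro s k
    simp [PySem.Dict.get?_empty]
  · rintro l ⟨i, j, _, hj, _⟩; omega

theorem pvContains_iff (arr : List Int) (t : Nat) (d : PySem.Dict Int Int)
    (hd : pvHashInv arr t d) (x : Int) :
    d.contains x = true ↔ ∃ m : Nat, m < t ∧ pvPre arr (m + 1) = x := by
  rw [PySem.Dict.contains_eq_isSome_get?]
  constructor
  · intro h
    obtain ⟨k, hk⟩ := Option.isSome_iff_exists.mp h
    obtain ⟨m, _, hmt, hpre, _⟩ := (hd x k).mp hk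
    exact ⟨m, hmt, hpre⟩
  · intro hex
    have hfind := Nat.find_spec hex
    have : d.get? x = some ((Nat.find hex : Nat) : Int) := by
      apply (hd x _).mpr
      refine ⟨Nat.find hex, rfl, hfind.1, hfind.2, ?_⟩
      intro m' hm' hc
      exact Nat.find_min hex hm' ⟨by omega, hc⟩
    simp [this]

theorem pvLookup (arr : List Int) (t : Nat) (d : PySem.Dict Int Int)
    (hd : pvHashInv arr t d) (x : Int) (h : d.contains x = true) :
    ∃ m : Nat, d.getD x 0 = (m : Int) ∧ m < t ∧ pvPre arr (m + 1) = x ∧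
      ∀ m' < m, pvPre arr (m' + 1) ≠ x := by
  rw [PySem.Dict.contains_eq_isSome_get?] at h
  obtain ⟨k, hk⟩ := Option.isSome_iff_exists.mp h
  obtain ⟨m, rfl, hmt, hpre, hmin⟩ := (hd x k).mp hk
  exact ⟨m, by simp [PySem.Dict.getD_eq_get?_getD, hk], hmt, hpre, hmin⟩

theorem pvStepA_eq (arr : List Int) (n m : Int) (d : PySem.Dict Int Int) (c s i : Int) :
    pvStepA arr n (m, d, c, s) i =
      ((if d.contains (s + PySem.List.pyGetD arr i 0 - n) = true then
          max (i - d.getD (s + PySem.List.pyGetD arr i 0 - n) 0)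
            (if s + PySem.List.pyGetD arr i 0 = n then max m (i + 1) else m)
        else (if s + PySem.List.pyGetD arr i 0 = n then max m (i + 1) else m)),
       (if d.contains (s + PySem.List.pyGetD arr i 0) = true then d
        else d.insert (s + PySem.List.pyGetD arr i 0) i),
       (if d.contains (s + PySem.List.pyGetD arr i 0 - n) = true then
          i - d.getD (s + PySem.List.pyGetD arr i 0 - n) 0
        else c),
       s + PySem.List.pyGetD arr i 0) := by
  simp only [pvStepA]
  by_cases h : d.contains (s + PySem.List.pyGetD arr i 0 - n) = true <;> simp [h]

theorem pvInvA_step (arr : List Int) (n : Int) (t : Nat) (ht : t < arr.length)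
    (st : Int × PySem.Dict Int Int × Int × Int) (h : pvInvA arr n t st) :
    pvInvA arr n (t + 1) (pvStepA arr n st (t : Int)) := by
  obtain ⟨m, d, c, s⟩ := st
  obtain ⟨hs, hd, hme, hmu⟩ := h
  simp only at hs hme hmu
  have hget : PySem.List.pyGetD arr ((t : Nat) : Int) 0 = arr[t] := by
    rw [PySem.List.pyGetD_natCast]
    exact List.getD_eq_getElem arr 0 ht
  have htot : s + PySem.List.pyGetD arr ((t : Nat) : Int) 0 = pvPre arr (t + 1) := by
    rw [hget, hs, pvPre_succ arr t ht]
  -- the new maxLen satisfies the characterization at t+1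
  have hM : ∀ M : Int,
      ((d.contains (pvPre arr (t + 1) - n) = false ∧
          M = (if pvPre arr (t + 1) = n then max m ((t : Int) + 1) else m)) ∨
        (d.contains (pvPre arr (t + 1) - n) = true ∧
          M = max ((t : Int) - d.getD (pvPre arr (t + 1) - n) 0)
                (if pvPre arr (t + 1) = n then max m ((t : Int) + 1) else m))) →
      pvChar (pvGoodE arr n (t + 1)) M := by
    intro M hMdef
    have hm1 : m ≤ (if pvPre arr (t + 1) = n then max m ((t : Int) + 1) else m) := by
      split_ifs <;> simp
    have hm1e : ∀ l, (if pvPre arr (t + 1) = n then max m ((t : Int) + 1) else m) = l →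
        l = m ∨ (pvPre arr (t + 1) = n ∧ l = (t : Int) + 1) := by
      intro l hl
      by_cases hc : pvPre arr (t + 1) = n
      · rw [if_pos hc] at hl
        rcases max_choice m ((t : Int) + 1) with hh | hh <;> rw [hh] at hl
        · exact Or.inl hl.symm
        · exact Or.inr ⟨hc, hl.symm⟩
      · rw [if_neg hc] at hl; exact Or.inl hl.symm
    constructor
    · -- existence: M = 0 or M is a window length
      have hcase : M = m ∨ (pvPre arr (t + 1) = n ∧ M = (t : Int) + 1) ∨
          (d.contains (pvPre arr (t + 1) - n) = true ∧
            M = (t : Int) - d.getD (pvPre arr (t + 1) - n) 0) := by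
        rcases hMdef with ⟨_, hh⟩ | ⟨hcont, hh⟩
        · rcases hm1e M hh.symm with h' | h'
          · exact Or.inl h'
          · exact Or.inr (Or.inl h')
        · rcases max_choice ((t : Int) - d.getD (pvPre arr (t + 1) - n) 0)
              (if pvPre arr (t + 1) = n then max m ((t : Int) + 1) else m) with h' | h' <;>
            rw [h'] at hh
          · exact Or.inr (Or.inr ⟨hcont, hh⟩)
          · rcases hm1e M hh.symm with h'' | h''
            · exact Or.inl h''
            · exact Or.inr (Or.inl h'')
      rcases hcase with hh | ⟨hc, hh⟩ | ⟨hcont, hh⟩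
      · rcases hme with h' | ⟨i, j, hij, hjt, hsum, hl⟩
        · exact Or.inl (by omega)
        · exact Or.inr ⟨i, j, hij, by omega, hsum, by omega⟩
      · refine Or.inr ⟨0, t, by omega, by omega, ?_, by push_cast [hh]; ring⟩
        simpa [pvPre] using hc
      · obtain ⟨m0, hgd, hm0t, hm0p, _⟩ := pvLookup arr t d hd _ hcont
        refine Or.inr ⟨m0 + 1, t, by omega, by omega, ?_, ?_⟩
        · rw [hm0p]; ring
        · rw [hh, hgd]; push_cast; ring
    · -- upper bound
      rintro l ⟨i, j, hij, hjt, hsum, rfl⟩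
      have hMm1 : (if pvPre arr (t + 1) = n then max m ((t : Int) + 1) else m) ≤ M := by
        rcases hMdef with ⟨_, hh⟩ | ⟨_, hh⟩
        · omega
        · rw [hh]; exact le_max_right _ _
      rcases Nat.lt_succ_iff_lt_or_eq.mp hjt with hj | hj
      · exact le_trans (hmu _ ⟨i, j, hij, hj, hsum, rfl⟩) (le_trans hm1 hMm1)
      · rw [hj] at hsum ⊢
        rcases Nat.eq_zero_or_pos i with hi | hi
        · subst hi
          have hc : pvPre arr (t + 1) = n := by simpa [pvPre] using hsum
          have h1 : ((t : Int) + 1) ≤ (if pvPre arr (t + 1) = n then max m ((t : Int) + 1) else m) := by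
            rw [if_pos hc]; exact le_max_right _ _
          have := le_trans h1 hMm1
          push_cast
          omega
        · obtain ⟨i', rfl⟩ : ∃ i', i = i' + 1 := ⟨i - 1, by omega⟩
          have hi't : i' < t := by omega
          have hpre : pvPre arr (i' + 1) = pvPre arr (t + 1) - n := by omega
          have hcont : d.contains (pvPre arr (t + 1) - n) = true :=
            (pvContains_iff arr t d hd _).mpr ⟨i', hi't, hpre⟩
          rcases hMdef with ⟨hcf, _⟩ | ⟨_, hh⟩
          · rw [hcont] at hcf; cases hcf
          · obtain ⟨m0, hgd, hm0t, hm0p, hm0min⟩ := pvLookup arr t d hd _ hcont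
            have hm0i : m0 ≤ i' := by
              by_contra hlt
              exact hm0min i' (by omega) hpre
            have hle : ((t : Int) - (m0 : Int)) ≤ M := by
              rw [hh, hgd]; exact le_max_left _ _
            push_cast
            push_cast at hle
            omega
  -- now discharge the actual goal component by component
  rw [pvStepA_eq, htot]
  refine ⟨rfl, ?_, ?_⟩
  · -- hash invariant at t+1
    show pvHashInv arr (t + 1)
      (if d.contains (pvPre arr (t + 1)) = true then d else d.insert (pvPre arr (t + 1)) (t : Int))
    by_cases hc3 : d.contains (pvPre arr (t + 1)) = true
    · rw [if_pos hc3]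
      intro s' k
      rw [hd s' k]
      constructor
      · rintro ⟨m', rfl, h1, h2, h3⟩; exact ⟨m', rfl, by omega, h2, h3⟩
      · rintro ⟨m', rfl, h1, h2, h3⟩
        refine ⟨m', rfl, ?_, h2, h3⟩
        rcases Nat.lt_succ_iff_lt_or_eq.mp h1 with h' | h'
        · exact h'
        · exfalso
          rw [h'] at h2
          obtain ⟨m'', hm''t, hm''p⟩ := (pvContains_iff arr t d hd _).mp (by rwa [h2] at hc3)
          exact h3 m'' (by omega) hm''p
    · rw [if_neg hc3]
      have hnotin : ∀ m' : Nat, m' < t → pvPre arr (m' + 1) ≠ pvPre arr (t + 1) := by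
        intro m' hm' hp
        exact hc3 ((pvContains_iff arr t d hd _).mpr ⟨m', hm', hp⟩)
      intro s' k
      rw [PySem.Dict.get?_insert]
      by_cases hs' : s' = pvPre arr (t + 1)
      · subst hs'
        rw [if_pos rfl]
        constructor
        · rintro h'
          have hk : k = (t : Int) := by exact_mod_cast (Option.some_injective _ h').symm
          exact ⟨t, hk, by omega, rfl, fun m'' hm'' => hnotin m'' (by omega)⟩
        · rintro ⟨m', rfl, h1, h2, h3⟩
          rcases Nat.lt_succ_iff_lt_or_eq.mp h1 with h' | h'
          · exact absurd h2 (hnotin m' h')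
          · subst h'; rfl
      · rw [if_neg hs', hd s' k]
        constructor
        · rintro ⟨m', rfl, h1, h2, h3⟩; exact ⟨m', rfl, by omega, h2, h3⟩
        · rintro ⟨m', rfl, h1, h2, h3⟩
          refine ⟨m', rfl, ?_, h2, h3⟩
          rcases Nat.lt_succ_iff_lt_or_eq.mp h1 with h' | h'
          · exact h'
          · exfalso; rw [h'] at h2; exact hs' h2.symm
  · -- the maxLen characterization, via hM
    show pvChar (pvGoodE arr n (t + 1))
      (if d.contains (pvPre arr (t + 1) - n) = true then
        max ((t : Int) - d.getD (pvPre arr (t + 1) - n) 0)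
          (if pvPre arr (t + 1) = n then max m ((t : Int) + 1) else m)
      else (if pvPre arr (t + 1) = n then max m ((t : Int) + 1) else m))
    by_cases hc2 : d.contains (pvPre arr (t + 1) - n) = true
    · rw [if_pos hc2]
      exact hM _ (Or.inr ⟨hc2, rfl⟩)
    · rw [if_neg hc2]
      exact hM _ (Or.inl ⟨by simpa using hc2, rfl⟩)

theorem pvCharA (arr : List Int) (n : Int) :
    pvChar (pvGoodE arr n arr.length) (longestSequeceThatSumToKUsingHashWorkFor0 arr n) := by
  have key : ∀ t ≤ arr.length, pvInvA arr n t (pvStateA arr n t) := by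
    intro t
    induction t with
    | zero => intro _; exact pvInvA_zero arr n
    | succ t ih =>
      intro h
      rw [pvStateA_succ]
      exact pvInvA_step arr n t (by omega) _ (ih (by omega))
  have := key arr.length le_rfl
  exact this.2.2

-- ---------- B side ----------

-- the prefix-sum list stage 1 builds, named
def pvPrefL (arr : List Int) : List Int := (List.range (arr.length + 1)).map (fun k => pvPre arr k)

def pvKeyF (arr : List Int) (k : Int) : Int :=
  PySem.List.pyGetD (pvPrefL arr) k 0 * ((arr.length + 1 : Nat) : Int) + k

def pvOrderL (arr : List Int) : List Int :=
  PySem.List.sorted (PySem.List.pyRange 0 ((arr.length + 1 : Nat) : Int) 1) (pvKeyF arr) false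

def pvStepJ (arr : List Int) (n : Int) (best j : Int) : Int :=
  match pvMinIndexWith (pvPrefL arr) (pvOrderL arr) (PySem.List.pyGetD (pvPrefL arr) j 0 - n) with
  | some i => if i < j then max best (j - i) else best
  | none => best

def pvBestState (arr : List Int) (n : Int) (t : Nat) : Int :=
  (PySem.List.pyRange 1 (t : Int) 1).foldl (pvStepJ arr n) 0

theorem pvPrefFold_eq (arr : List Int) :
    arr.foldl (fun st x => (st.1 ++ [st.2 + x], st.2 + x)) (([0] : List Int), (0 : Int))
      = (pvPrefL arr, arr.sum) := by
  induction arr using List.reverseRecOn with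
  | nil => simp [pvPrefL, pvPre]
  | append_singleton l x ih =>
    rw [List.foldl_append, ih, List.foldl_cons, List.foldl_nil]
    refine Prod.ext ?_ (by simp)
    show pvPrefL l ++ [l.sum + x] = pvPrefL (l ++ [x])
    have hr : List.range ((l ++ [x]).length + 1)
        = List.range (l.length + 1) ++ [l.length + 1] := by
      rw [List.length_append, List.length_singleton]
      exact List.range_succ
    unfold pvPrefL
    rw [hr, List.map_append]
    congr 1
    · apply List.map_congr_left
      intro k hk
      have hk' : k ≤ l.length := by
        have := List.mem_range.mp hk; omega
      unfold pvPre
      rw [List.take_append_of_le_length hk']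
    · simp only [List.map_cons, List.map_nil]
      unfold pvPre
      rw [List.take_of_length_le (by simp), List.sum_append]
      simp

theorem pvPrefL_length (arr : List Int) : (pvPrefL arr).length = arr.length + 1 := by
  simp [pvPrefL]

theorem pvPrefL_get (arr : List Int) (k : Nat) (hk : k < arr.length + 1) :
    PySem.List.pyGetD (pvPrefL arr) ((k : Nat) : Int) 0 = pvPre arr k := by
  rw [PySem.List.pyGetD_natCast]
  unfold pvPrefL
  exact PySem.List.getD_map_range _ _ _ _ hk

theorem pvOrderL_length (arr : List Int) : (pvOrderL arr).length = arr.length + 1 := by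
  unfold pvOrderL
  rw [PySem.List.length_sorted]
  induction arr.length + 1 with
  | zero => simp [PySem.List.pyRange_one_eq_nil]
  | succ t ih =>
    rw [show ((t + 1 : Nat) : Int) = (t : Int) + 1 by push_cast; ring,
      PySem.List.pyRange_one_succ_right (by exact_mod_cast Nat.zero_le t)]
    simp [ih]

theorem pvOrderL_mem_range (arr : List Int) (p : Nat) (hp : p < arr.length + 1) :
    0 ≤ (pvOrderL arr)[p]'(by rw [pvOrderL_length]; exact hp) ∧
    (pvOrderL arr)[p]'(by rw [pvOrderL_length]; exact hp) < ((arr.length + 1 : Nat) : Int) := by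
  have hmem : (pvOrderL arr)[p]'(by rw [pvOrderL_length]; exact hp) ∈ pvOrderL arr :=
    List.getElem_mem _
  have : (pvOrderL arr)[p]'(by rw [pvOrderL_length]; exact hp)
      ∈ PySem.List.pyRange 0 ((arr.length + 1 : Nat) : Int) 1 :=
    (PySem.List.sorted_perm _ _ _).mem_iff.mp hmem
  have h := PySem.List.mem_pyRange_one.mp this
  exact ⟨h.1, h.2⟩

theorem pvOrderL_surj (arr : List Int) (k : Nat) (hk : k < arr.length + 1) :
    ∃ p : Nat, ∃ hp : p < arr.length + 1,
      (pvOrderL arr)[p]'(by rw [pvOrderL_length]; exact hp) = (k : Int) := by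
  have hmem : (k : Int) ∈ pvOrderL arr := by
    apply (PySem.List.sorted_perm _ _ _).mem_iff.mpr
    exact PySem.List.mem_pyRange_one.mpr ⟨by positivity, by exact_mod_cast hk⟩
  obtain ⟨p, hp, hpe⟩ := List.mem_iff_getElem.mp hmem
  exact ⟨p, by rw [pvOrderL_length] at hp; exact hp, hpe⟩

-- the value pref[order[p]] seen at sorted position p
def pvValAt (arr : List Int) (p : Nat) : Int :=
  PySem.List.pyGetD (pvPrefL arr) (PySem.List.pyGetD (pvOrderL arr) ((p : Nat) : Int) 0) 0

theorem pvValAt_eq (arr : List Int) (p : Nat) (hp : p < arr.length + 1) :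
    pvValAt arr p
      = pvPre arr ((pvOrderL arr)[p]'(by rw [pvOrderL_length]; exact hp)).toNat := by
  unfold pvValAt
  rw [PySem.List.pyGetD_natCast, List.getD_eq_getElem _ _ (by rw [pvOrderL_length]; exact hp)]
  obtain ⟨h0, h1⟩ := pvOrderL_mem_range arr p hp
  set o := (pvOrderL arr)[p]'(by rw [pvOrderL_length]; exact hp) with ho
  rw [show o = ((o.toNat : Nat) : Int) by omega]
  exact pvPrefL_get arr o.toNat (by omega)

-- the arithmetic behind the injective integer key: key independent comparison
theorem pvKeyLe_elim {va vb a b m : Int} (ha : 0 ≤ a) (hb : 0 ≤ b) (hbm : b < m)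
    (h : va * m + a ≤ vb * m + b) : va ≤ vb ∧ (va = vb → a ≤ b) := by
  constructor
  · rcases (by omega : va ≤ vb ∨ vb < va) with hle | hlt
    · exact hle
    · exfalso
      have h2 : (vb + 1) * m ≤ va * m :=
        mul_le_mul_of_nonneg_right (by omega) (by omega)
      rw [add_mul, one_mul] at h2
      linarith
  · intro he
    rw [he] at h
    omega

theorem pvKey_mono (arr : List Int) (p q : Nat) (hpq : p ≤ q) (hq : q < arr.length + 1) :
    pvValAt arr p ≤ pvValAt arr q ∧
      (pvValAt arr p = pvValAt arr q →
        PySem.List.pyGetD (pvOrderL arr) ((p : Nat) : Int) 0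
          ≤ PySem.List.pyGetD (pvOrderL arr) ((q : Nat) : Int) 0) := by
  have hp : p < arr.length + 1 := by omega
  have hq' : q < (pvOrderL arr).length := by rw [pvOrderL_length]; exact hq
  have hp' : p < (pvOrderL arr).length := by rw [pvOrderL_length]; exact hp
  have hmono : pvKeyF arr ((pvOrderL arr)[p]'hp') ≤ pvKeyF arr ((pvOrderL arr)[q]'hq') :=
    PySem.List.key_sorted_getElem_mono
      (PySem.List.pyRange 0 ((arr.length + 1 : Nat) : Int) 1) (pvKeyF arr) hpq hq'
  unfold pvKeyF at hmono
  obtain ⟨hop0, hop1⟩ := pvOrderL_mem_range arr p hp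
  obtain ⟨hoq0, hoq1⟩ := pvOrderL_mem_range arr q hq
  have hgp : PySem.List.pyGetD (pvOrderL arr) ((p : Nat) : Int) 0 = (pvOrderL arr)[p]'hp' := by
    rw [PySem.List.pyGetD_natCast]
    exact List.getD_eq_getElem _ _ hp'
  have hgq : PySem.List.pyGetD (pvOrderL arr) ((q : Nat) : Int) 0 = (pvOrderL arr)[q]'hq' := by
    rw [PySem.List.pyGetD_natCast]
    exact List.getD_eq_getElem _ _ hq'
  have hvp : pvValAt arr p = PySem.List.pyGetD (pvPrefL arr) ((pvOrderL arr)[p]'hp') 0 := by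
    unfold pvValAt; rw [hgp]
  have hvq : pvValAt arr q = PySem.List.pyGetD (pvPrefL arr) ((pvOrderL arr)[q]'hq') 0 := by
    unfold pvValAt; rw [hgq]
  have := pvKeyLe_elim hop0 hoq0 hoq1 hmono
  refine ⟨by rw [hvp, hvq]; exact this.1, fun he => ?_⟩
  rw [hgp, hgq]
  exact this.2 (by rw [← hvp, ← hvq]; exact he)

theorem pvFloordiv_two (a : Int) : PySem.Int.floordiv a 2 = a / 2 := by
  simp [PySem.Int.floordiv, Int.fdiv_eq_ediv]

theorem pvMinIdxLoop_eq (pref order : List Int) (v lo hi : Int) :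
    pvMinIdxLoop pref order v lo hi =
      if lo < hi then
        (if PySem.List.pyGetD pref
              (PySem.List.pyGetD order (PySem.Int.floordiv (lo + hi) 2) 0) 0 < v then
          pvMinIdxLoop pref order v (PySem.Int.floordiv (lo + hi) 2 + 1) hi
        else
          pvMinIdxLoop pref order v lo (PySem.Int.floordiv (lo + hi) 2))
      else lo := by
  rw [pvMinIdxLoop]
  by_cases h : lo < hi
  · rw [dif_pos h, if_pos h]
  · rw [dif_neg h, if_neg h]

-- binary search: the returned split point separates values < v from values ≥ v
theorem pvLoop_spec (arr : List Int) (v : Int) : ∀ fuel : Nat, ∀ lo hi : Int,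
    (hi - lo).toNat ≤ fuel → 0 ≤ lo → lo ≤ hi → hi ≤ ((arr.length + 1 : Nat) : Int) →
    (∀ p : Nat, (p : Int) < lo → pvValAt arr p < v) →
    (∀ p : Nat, hi ≤ (p : Int) → p < arr.length + 1 → v ≤ pvValAt arr p) →
    0 ≤ pvMinIdxLoop (pvPrefL arr) (pvOrderL arr) v lo hi ∧
    pvMinIdxLoop (pvPrefL arr) (pvOrderL arr) v lo hi ≤ ((arr.length + 1 : Nat) : Int) ∧
    (∀ p : Nat, (p : Int) < pvMinIdxLoop (pvPrefL arr) (pvOrderL arr) v lo hi →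
      pvValAt arr p < v) ∧
    (∀ p : Nat, pvMinIdxLoop (pvPrefL arr) (pvOrderL arr) v lo hi ≤ (p : Int) →
      p < arr.length + 1 → v ≤ pvValAt arr p) := by
  intro fuel
  induction fuel with
  | zero =>
    intro lo hi hfuel h0 hlh hhm hlow hhigh
    rw [pvMinIdxLoop_eq, if_neg (by omega)]
    exact ⟨h0, le_trans hlh hhm, hlow, fun p hp1 hp2 => hhigh p (by omega) hp2⟩
  | succ fuel ih =>
    intro lo hi hfuel h0 hlh hhm hlow hhigh
    rw [pvMinIdxLoop_eq]
    by_cases hlt : lo < hi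
    · rw [if_pos hlt]
      have hmb : lo ≤ PySem.Int.floordiv (lo + hi) 2 ∧ PySem.Int.floordiv (lo + hi) 2 < hi := by
        rw [pvFloordiv_two]; omega
      have hmlen : (PySem.Int.floordiv (lo + hi) 2).toNat < arr.length + 1 := by omega
      have hvmid : PySem.List.pyGetD (pvPrefL arr)
          (PySem.List.pyGetD (pvOrderL arr) (PySem.Int.floordiv (lo + hi) 2) 0) 0
          = pvValAt arr (PySem.Int.floordiv (lo + hi) 2).toNat := by
        unfold pvValAt
        rw [show PySem.Int.floordiv (lo + hi) 2
            = (((PySem.Int.floordiv (lo + hi) 2).toNat : Nat) : Int) by omega]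
        rw [Int.toNat_natCast]
      rw [hvmid]
      by_cases hc : pvValAt arr (PySem.Int.floordiv (lo + hi) 2).toNat < v
      · rw [if_pos hc]
        apply ih (PySem.Int.floordiv (lo + hi) 2 + 1) hi
          (by rw [pvFloordiv_two] at *; omega) (by omega) (by omega) hhm
        · intro p hp
          have hplen : p < arr.length + 1 := by omega
          have := (pvKey_mono arr p (PySem.Int.floordiv (lo + hi) 2).toNat (by omega) hmlen).1
          omega
        · exact hhigh
      · rw [if_neg hc]
        apply ih lo (PySem.Int.floordiv (lo + hi) 2)
          (by rw [pvFloordiv_two] at *; omega) h0 (by omega) (by omega) hlow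
        intro p hp1 hp2
        have := (pvKey_mono arr (PySem.Int.floordiv (lo + hi) 2).toNat p (by omega) hp2).1
        omega
    · rw [if_neg hlt]
      exact ⟨h0, le_trans hlh hhm, hlow, fun p hp1 hp2 => hhigh p (by omega) hp2⟩

-- characterisation of the helper: some i = the least prefix index with pvPre = v
theorem pvMinIndexWith_spec (arr : List Int) (v : Int) :
    (∀ i : Int, pvMinIndexWith (pvPrefL arr) (pvOrderL arr) v = some i →
      ∃ k : Nat, i = (k : Int) ∧ k < arr.length + 1 ∧ pvPre arr k = v ∧
        ∀ k' : Nat, k' < arr.length + 1 → pvPre arr k' = v → k ≤ k') ∧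
    (pvMinIndexWith (pvPrefL arr) (pvOrderL arr) v = none →
      ∀ k : Nat, k < arr.length + 1 → pvPre arr k ≠ v) := by
  have hlen : ((pvOrderL arr).length : Int) = ((arr.length + 1 : Nat) : Int) := by
    rw [pvOrderL_length]
  obtain ⟨hr0, hrm, hrlow, hrhigh⟩ :=
    pvLoop_spec arr v ((arr.length + 1 : Nat)) 0 ((pvOrderL arr).length : Int)
      (by omega) le_rfl (by positivity) (le_of_eq hlen)
      (by intro p hp; omega)
      (by intro p hp1 hp2; rw [hlen] at hp1; omega)
  set r := pvMinIdxLoop (pvPrefL arr) (pvOrderL arr) v 0 ((pvOrderL arr).length : Int) with hrdef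
  have hval_eq : r < ((pvOrderL arr).length : Int) →
      PySem.List.pyGetD (pvPrefL arr) (PySem.List.pyGetD (pvOrderL arr) r 0) 0
        = pvValAt arr r.toNat := by
    intro h
    unfold pvValAt
    rw [show r = ((r.toNat : Nat) : Int) by omega, Int.toNat_natCast]
  constructor
  · intro i hi
    unfold pvMinIndexWith at hi
    rw [← hrdef] at hi
    replace hi : (if r < ((pvOrderL arr).length : Int) ∧
        PySem.List.pyGetD (pvPrefL arr) (PySem.List.pyGetD (pvOrderL arr) r 0) 0 = v then
          some (PySem.List.pyGetD (pvOrderL arr) r 0)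
        else none) = some i := hi
    split_ifs at hi with hguard
    · obtain ⟨hg1, hg2⟩ := hguard
      rw [hval_eq hg1] at hg2
      have hrnat : r.toNat < arr.length + 1 := by rw [hlen] at hg1; omega
      have hio : i = PySem.List.pyGetD (pvOrderL arr) r 0 := by
        exact (Option.some_injective _ hi).symm
      have hgetr : PySem.List.pyGetD (pvOrderL arr) r 0
          = (pvOrderL arr)[r.toNat]'(by rw [pvOrderL_length]; exact hrnat) := by
        conv_lhs => rw [show r = ((r.toNat : Nat) : Int) by omega]
        rw [PySem.List.pyGetD_natCast]
        exact List.getD_eq_getElem _ _ (by rw [pvOrderL_length]; exact hrnat)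
      obtain ⟨ho0, ho1⟩ := pvOrderL_mem_range arr r.toNat hrnat
      refine ⟨((pvOrderL arr)[r.toNat]'(by rw [pvOrderL_length]; exact hrnat)).toNat,
        by rw [hio, hgetr]; omega, by omega, ?_, ?_⟩
      · rw [← pvValAt_eq arr r.toNat hrnat]
        exact hg2
      · intro k' hk' hpk'
        obtain ⟨q, hq, hqe⟩ := pvOrderL_surj arr k' hk'
        have hvq : pvValAt arr q = v := by
          rw [pvValAt_eq arr q hq, hqe]
          rw [Int.toNat_natCast]
          exact hpk'
        have hqr : r.toNat ≤ q := by
          by_contra hqr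
          have := hrlow q (by omega)
          omega
        have hmono := (pvKey_mono arr r.toNat q hqr hq).2 (by rw [hg2, hvq])
        have hgq : PySem.List.pyGetD (pvOrderL arr) ((q : Nat) : Int) 0
            = (pvOrderL arr)[q]'(by rw [pvOrderL_length]; exact hq) := by
          rw [PySem.List.pyGetD_natCast]
          exact List.getD_eq_getElem _ _ (by rw [pvOrderL_length]; exact hq)
        rw [show ((r.toNat : Nat) : Int) = r by omega, hgetr, hgq, hqe] at hmono
        omega
  · intro hnone k hk hpk
    unfold pvMinIndexWith at hnone
    rw [← hrdef] at hnone
    replace hnone : (if r < ((pvOrderL arr).length : Int) ∧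
        PySem.List.pyGetD (pvPrefL arr) (PySem.List.pyGetD (pvOrderL arr) r 0) 0 = v then
          some (PySem.List.pyGetD (pvOrderL arr) r 0)
        else none) = none := hnone
    split_ifs at hnone with hguard
    obtain ⟨q, hq, hqe⟩ := pvOrderL_surj arr k hk
    have hvq : pvValAt arr q = v := by
      rw [pvValAt_eq arr q hq, hqe, Int.toNat_natCast]
      exact hpk
    have hqr : r ≤ (q : Int) := by
      by_contra hqr
      have := hrlow q (by omega)
      omega
    have hrlt : r < ((pvOrderL arr).length : Int) := by rw [hlen]; omega
    have hrnat : r.toNat < arr.length + 1 := by rw [hlen] at hrlt; omega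
    have hge := hrhigh r.toNat (by omega) hrnat
    have hle := (pvKey_mono arr r.toNat q (by omega) hq).1
    rw [hvq] at hle
    have hveq : pvValAt arr r.toNat = v := by omega
    apply hguard
    exact ⟨hrlt, by rw [hval_eq hrlt]; exact hveq⟩

theorem pvBestState_succ (arr : List Int) (n : Int) (t : Nat) (ht : 1 ≤ t) :
    pvBestState arr n (t + 1) = pvStepJ arr n (pvBestState arr n t) (t : Int) := by
  unfold pvBestState
  rw [show ((t + 1 : Nat) : Int) = (t : Int) + 1 by push_cast; ring,
    PySem.List.pyRange_one_succ_right (by exact_mod_cast ht), List.foldl_append]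
  rfl

theorem pvBestInv (arr : List Int) (n : Int) :
    ∀ t : Nat, 1 ≤ t → t ≤ arr.length + 1 →
      pvChar (pvGoodE arr n (t - 1)) (pvBestState arr n t) := by
  intro t
  induction t with
  | zero => omega
  | succ t ih =>
    intro _ h2
    rcases Nat.lt_or_ge t 1 with ht1 | ht1
    · -- t = 0 : base case, empty range of ends
      have ht0 : t = 0 := by omega
      subst ht0
      have h0 : pvBestState arr n 1 = 0 := by
        unfold pvBestState
        rw [PySem.List.pyRange_one_eq_nil (by norm_num), List.foldl_nil]
      rw [h0]
      exact ⟨Or.inl rfl, by rintro l ⟨i, j, _, hj, _⟩; omega⟩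
    · -- step: process end index j = t (window end t-1)
      have hc := ih ht1 (by omega)
      rw [pvBestState_succ arr n t ht1]
      set best := pvBestState arr n t with hbest
      have htm : t < arr.length + 1 := by omega
      have hvj : PySem.List.pyGetD (pvPrefL arr) ((t : Nat) : Int) 0 - n = pvPre arr t - n := by
        rw [pvPrefL_get arr t htm]
      unfold pvStepJ
      rw [hvj]
      obtain ⟨hsome, hnone⟩ := pvMinIndexWith_spec arr (pvPre arr t - n)
      rcases hmw : pvMinIndexWith (pvPrefL arr) (pvOrderL arr) (pvPre arr t - n) with _ | i
      · -- none: no prefix equals pvPre t - n, no window ends at t-1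
        show pvChar (pvGoodE arr n t) best
        refine ⟨?_, ?_⟩
        · rcases hc.1 with h | ⟨a, b, hab, hb, hs, hl⟩
          · exact Or.inl h
          · exact Or.inr ⟨a, b, hab, by omega, hs, hl⟩
        · rintro l ⟨a, b, hab, hb, hs, rfl⟩
          rcases Nat.lt_or_ge b (t - 1) with hb' | hb'
          · exact hc.2 _ ⟨a, b, hab, by omega, hs, rfl⟩
          · have hbt : b = t - 1 := by omega
            subst hbt
            exfalso
            have hb1 : (t - 1) + 1 = t := by omega
            rw [hb1] at hs
            exact hnone hmw a (by omega) (by omega)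
      · -- some i
        obtain ⟨k, rfl, hkm, hkp, hkmin⟩ := hsome _ hmw
        show pvChar (pvGoodE arr n t)
          (if (k : Int) < (t : Int) then max best ((t : Int) - (k : Int)) else best)
        by_cases hik : (k : Int) < (t : Int)
        · rw [if_pos hik]
          refine ⟨?_, ?_⟩
          · -- existence: either old best or the new window (k, t-1)
            rcases max_choice best ((t : Int) - (k : Int)) with h' | h' <;> rw [h']
            · rcases hc.1 with h | ⟨a, b, hab, hb, hs, hl⟩
              · exact Or.inl h
              · exact Or.inr ⟨a, b, hab, by omega, hs, hl⟩
            · refine Or.inr ⟨k, t - 1, by omega, by omega, ?_, by omega⟩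
              rw [show (t - 1) + 1 = t by omega]
              omega
          · rintro l ⟨a, b, hab, hb, hs, rfl⟩
            rcases Nat.lt_or_ge b (t - 1) with hb' | hb'
            · exact le_trans (hc.2 _ ⟨a, b, hab, by omega, hs, rfl⟩) (le_max_left _ _)
            · have hbt : b = t - 1 := by omega
              subst hbt
              rw [show (t - 1) + 1 = t by omega] at hs
              have hka : k ≤ a := hkmin a (by omega) (by omega)
              have : (t - 1 : Nat) - (a : Int) + 1 ≤ (t : Int) - (k : Int) := by
                omega
              calc ((t - 1 : Nat) : Int) - (a : Int) + 1 ≤ (t : Int) - (k : Int) := this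
                _ ≤ max best ((t : Int) - (k : Int)) := le_max_right _ _
        · rw [if_neg hik]
          -- the least matching prefix index is ≥ t: no window ends at t-1
          refine ⟨?_, ?_⟩
          · rcases hc.1 with h | ⟨a, b, hab, hb, hs, hl⟩
            · exact Or.inl h
            · exact Or.inr ⟨a, b, hab, by omega, hs, hl⟩
          · rintro l ⟨a, b, hab, hb, hs, rfl⟩
            rcases Nat.lt_or_ge b (t - 1) with hb' | hb'
            · exact hc.2 _ ⟨a, b, hab, by omega, hs, rfl⟩
            · have hbt : b = t - 1 := by omega
              subst hbt
              exfalso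
              rw [show (t - 1) + 1 = t by omega] at hs
              have := hkmin a (by omega) (by omega)
              omega

theorem pvAlt_eq (arr : List Int) (n : Int) :
    longestSequeceThatSumToKUsingHashWorkFor0_alt arr n = pvBestState arr n (arr.length + 1) := by
  unfold longestSequeceThatSumToKUsingHashWorkFor0_alt pvBestState pvStepJ pvOrderL pvKeyF
  rw [pvPrefFold_eq]
  have hlen : ((pvPrefL arr).length : Int) = ((arr.length + 1 : Nat) : Int) := by
    rw [pvPrefL_length]
  simp only [hlen]

theorem pvCharB (arr : List Int) (n : Int) :
    pvChar (pvGoodE arr n arr.length) (longestSequeceThatSumToKUsingHashWorkFor0_alt arr n) := by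
  rw [pvAlt_eq]
  have := pvBestInv arr n (arr.length + 1) (by omega) le_rfl
  simpa using this

-- ===== VERDICT (by name: the statement is the Claim_ definition above) =====
theorem longestSequeceThatSumToKUsingHashWorkFor0_spec : Claim_equal_longestSequeceThatSumToKUsingHashWorkFor0 := by
  intro arr n _
  exact pvChar_unique _ (pvGoodE_one arr n) (pvCharA arr n) (pvCharB arr n)
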